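-- pv_equiv track=rewrite | github.com/Zach4fbr/CodeExamChallenge | PyDéfis3/Hercule08Juments.py | frugal
-- ===== SOURCE A (Python) =====
-- def prime_factors(n):
--     prime = []
--     d = 2
--     while d*d <= n:
--         while (n % d) == 0:
--             prime.append(d)
--             n //= d
--         d += 1
--     if n > 1:
--        prime.append(n)
--     return prime
--
-- def hashe(l):
--     a=sorted(set(l), key=l.index)
--     return a
--
-- def power(n,l):
--     a=l.count(n)
--     return a
--
-- def final(n):
--     p=prime_factors(n)
--     a=hashe(p)
--     x=""
--     for i in range(len(a)):
--         if power(a[i],p) != 1: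
--             x=x+(str(a[i])+'^'+'{'+str(power(a[i],p)))+'}'
--         else:
--             x=x+(str(a[i]))
--         if i !=len(a)-1:
--             x=x+'x'
--     return x
--
-- def frugal(n):
--     p = final(n)
--     n = str(n)
--     m = len(n)
--     s = 0
--     for i in range(len(p)):
--         for j in range(100):
--             if p[i] == str(j):
--                 s+=1
--     if s >= m:
--         return False
--     else:
--         return True
-- ===== SOURCE B (Python) =====
-- def frugal(n):
--     # Accumulate the factorization's digit count numerically instead of
--     # building the formatted string and scanning its characters.
--     s = 0
--     m = n
--     d = 2
--     while d * d <= m: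
--         if m % d == 0:
--             e = 0
--             while m % d == 0:
--                 m //= d
--                 e += 1
--             s += len(str(d)) + (len(str(e)) if e > 1 else 0)
--         d += 1
--     if m > 1:
--         s += len(str(m))
--     return s < len(str(n))
-- ===== Notes on version B (the rewrite author's own statement) =====
-- stated objective: simpler
-- what changed: B drops the prime list, the first-occurrence dedup, the formatted '2^{3}x5' string and the nested range(100) character scan entirely: it trial-divides once, and for each prime factor adds len(str(prime)) plus len(str(exponent)) when the exponent exceeds 1, comparing that running digit count with len(str(n)).
import Mathlib
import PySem

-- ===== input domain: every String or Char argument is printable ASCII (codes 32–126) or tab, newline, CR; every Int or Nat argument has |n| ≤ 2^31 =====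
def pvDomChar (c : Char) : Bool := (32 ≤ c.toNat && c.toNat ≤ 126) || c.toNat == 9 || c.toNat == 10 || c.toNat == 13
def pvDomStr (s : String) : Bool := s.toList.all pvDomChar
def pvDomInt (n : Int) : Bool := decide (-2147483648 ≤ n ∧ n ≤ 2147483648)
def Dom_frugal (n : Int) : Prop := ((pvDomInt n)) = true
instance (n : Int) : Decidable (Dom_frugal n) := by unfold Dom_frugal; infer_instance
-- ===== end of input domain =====

-- B computes the digit count of the factorization numerically (sum of len(str(prime)) and
-- len(str(exponent)) for exponents > 1) instead of building A's formatted string '2^{3}x5'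
-- and scanning its characters against str(j) for j in range(100): simpler, one pass.
-- Python strings are modeled as List Char (PySem.Chars); '+' on str is '++'.

-- ===== PORT A =====

-- termination-measure lemmas cited by the loops' decreasing_by proofs
theorem pvDecShrink (d n : Int) (h : PySem.Int.mod n d = 0 ∧ 2 ≤ d ∧ 0 < n) :
    (PySem.Int.floordiv n d).toNat < n.toNat := by
  obtain ⟨h1, h2, h3⟩ := h
  have hd : (0:Int) < d := lt_of_lt_of_le zero_lt_two h2
  rw [PySem.Int.floordiv_eq_ediv_of_pos hd]
  exact (Int.toNat_lt_toNat h3).mpr (Int.ediv_lt_of_lt_mul hd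
    ((lt_mul_iff_one_lt_right h3).mpr (lt_of_lt_of_le one_lt_two h2)))

theorem pvDecOuter (k : Nat) (m x : Int) (hle : x ≤ m)
    (h : ((k : Int) + 2) * ((k : Int) + 2) ≤ m) :
    x.toNat + 2 - (k + 1) < m.toNat + 2 - k := by
  have h4 : (k : Int) + 2 ≤ m :=
    le_trans (le_mul_of_one_le_left (by positivity) (by omega)) h
  have := Int.toNat_le_toNat hle
  omega

theorem pvDecStay (k : Nat) (m : Int) (h : ((k : Int) + 2) * ((k : Int) + 2) ≤ m) :
    m.toNat + 2 - (k + 1) < m.toNat + 2 - k := by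
  have h4 : (k : Int) + 2 ≤ m :=
    le_trans (le_mul_of_one_le_left (by positivity) (by omega)) h
  omega

-- inner loop 'while n % d == 0: prime.append(d); n //= d' of prime_factors;
-- the '2 ≤ d ∧ 0 < n' conjuncts only make the recursion total: Python reaches this
-- loop only with d ≥ 2 and (given d*d ≤ n) 0 < n, where they hold.
def innerA (d n : Int) (acc : List Int) : List Int × Int :=
  if h : PySem.Int.mod n d = 0 ∧ 2 ≤ d ∧ 0 < n then
    innerA d (PySem.Int.floordiv n d) (acc ++ [d])
  else (acc, n)
termination_by n.toNat
decreasing_by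
  exact pvDecShrink _ _ h

-- the inner loop never increases n (cited by outerA's termination proof)
theorem innerA_snd_le (d n : Int) (acc : List Int) : (innerA d n acc).2 ≤ n := by
  induction n, acc using innerA.induct d with
  | case1 n acc h ih =>
    rw [innerA, dif_pos h]
    obtain ⟨h1, h2, h3⟩ := h
    have : PySem.Int.floordiv n d ≤ n := by
      rw [PySem.Int.floordiv_eq_ediv_of_pos (by omega : (0:Int) < d)]
      exact Int.ediv_le_self _ (by omega)
    omega
  | case2 n acc h => rw [innerA, dif_neg h]

-- outer loop 'while d*d <= n: <inner>; d += 1' of prime_factors; d = k + 2 (d starts at 2)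
def outerA (k : Nat) (n : Int) (acc : List Int) : List Int × Int :=
  if h : ((k : Int) + 2) * ((k : Int) + 2) ≤ n then
    let p := innerA ((k : Int) + 2) n acc
    outerA (k + 1) p.2 p.1
  else (acc, n)
termination_by n.toNat + 2 - k
decreasing_by
  exact pvDecOuter k n _ (innerA_snd_le ((k : Int) + 2) n acc) h

def primeFactorsA (n : Int) : List Int :=
  let p := outerA 0 n []
  if 1 < p.2 then p.1 ++ [p.2] else p.1

-- hashe: sorted(set(l), key=l.index); every member of set(l) is in l, so l.index
-- always succeeds and '(index? l x).getD 0' is exact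
def hasheA (l : List Int) : List Int :=
  PySem.List.sorted (PySem.Set.ofList l) (fun x => (PySem.List.index? l x).getD 0)

def powerA (n : Int) (l : List Int) : Int := (PySem.List.count l n : Int)

def finalA (n : Int) : List Char :=
  let p := primeFactorsA n
  let a := hasheA p
  (PySem.List.pyRange 0 (PySem.List.len a)).foldl (fun x i =>
      let x := if powerA (PySem.List.pyGetD a i 0) p ≠ 1 then
          x ++ (PySem.Int.toChars (PySem.List.pyGetD a i 0) ++ ['^'] ++ ['{'] ++
                PySem.Int.toChars (powerA (PySem.List.pyGetD a i 0) p)) ++ ['}']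
        else x ++ PySem.Int.toChars (PySem.List.pyGetD a i 0)
      if i ≠ PySem.List.len a - 1 then x ++ ['x'] else x) []

def frugal (n : Int) : Bool :=
  let p := finalA n
  let m := PySem.List.len (PySem.Int.toChars n)
  let s := (PySem.List.pyRange 0 (PySem.List.len p)).foldl (fun s i =>
      (PySem.List.pyRange 0 100).foldl (fun s j =>
        if [PySem.List.pyGetD p i ' '] = PySem.Int.toChars j then s + 1 else s) s) (0 : Int)
  if s ≥ m then false else true

-- ===== PORT B =====

-- inner loop 'while m % d == 0: m //= d; e += 1'; the '2 ≤ d ∧ 0 < m' conjuncts only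
-- make the recursion total (B's loop is reached only with d ≥ 2 and 0 < m)
def bInner (m d e : Int) : Int × Int :=
  if h : PySem.Int.mod m d = 0 ∧ 2 ≤ d ∧ 0 < m then
    bInner (PySem.Int.floordiv m d) d (e + 1)
  else (m, e)
termination_by m.toNat
decreasing_by
  exact pvDecShrink _ _ h

-- the inner loop never increases m (cited by bOuter's termination proof)
theorem bInner_fst_le (m d e : Int) : (bInner m d e).1 ≤ m := by
  induction m, e using bInner.induct d with
  | case1 m e h ih =>
    rw [bInner, dif_pos h]
    obtain ⟨h1, h2, h3⟩ := h
    have : PySem.Int.floordiv m d ≤ m := by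
      rw [PySem.Int.floordiv_eq_ediv_of_pos (by omega : (0:Int) < d)]
      exact Int.ediv_le_self _ (by omega)
    omega
  | case2 m e h => rw [bInner, dif_neg h]

-- outer loop of B: returns (s, m); d = k + 2
def bOuter (k : Nat) (m s : Int) : Int × Int :=
  if h : ((k : Int) + 2) * ((k : Int) + 2) ≤ m then
    if PySem.Int.mod m ((k : Int) + 2) = 0 then
      let p := bInner m ((k : Int) + 2) 0
      bOuter (k + 1) p.1 (s + PySem.List.len (PySem.Int.toChars ((k : Int) + 2)) +
        (if 1 < p.2 then PySem.List.len (PySem.Int.toChars p.2) else 0))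
    else bOuter (k + 1) m s
  else (s, m)
termination_by m.toNat + 2 - k
decreasing_by
  · exact pvDecOuter k m _ (bInner_fst_le m ((k : Int) + 2) 0) h
  · exact pvDecStay k m h

def frugal_alt (n : Int) : Bool :=
  let p := bOuter 0 n 0
  let s := if 1 < p.2 then p.1 + PySem.List.len (PySem.Int.toChars p.2) else p.1
  decide (s < PySem.List.len (PySem.Int.toChars n))

-- ===== PRECONDITION & SPEC =====
def Spec_frugal (n : Int) (out : Bool) : Prop := out = frugal_alt n
instance (n : Int) (out : Bool) : Decidable (Spec_frugal n out) := by unfold Spec_frugal; infer_instance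

-- ===== CLAIM (what is proved, stated in full; the proofs are below) =====
def Claim_equal_frugal : Prop := ∀ (n : Int), Dom_frugal n → Spec_frugal n (frugal n)


-- ===== LEMMAS AND PROOFS =====

-- ---- the common factorization trace: (prime, exponent) groups plus remainder ----

def grs (k : Nat) (m : Int) : List (Int × Int) × Int :=
  if h : ((k : Int) + 2) * ((k : Int) + 2) ≤ m then
    if PySem.Int.mod m ((k : Int) + 2) = 0 then
      let p := bInner m ((k : Int) + 2) 0
      let r := grs (k + 1) p.1
      (((k : Int) + 2, p.2) :: r.1, r.2)
    else grs (k + 1) m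
  else ([], m)
termination_by m.toNat + 2 - k
decreasing_by
  · exact pvDecOuter k m _ (bInner_fst_le m ((k : Int) + 2) 0) h
  · exact pvDecStay k m h

def flatG (gs : List (Int × Int)) : List Int := gs.flatMap (fun g => List.replicate g.2.toNat g.1)

def plistG (gs : List (Int × Int)) (R : Int) : List Int := flatG gs ++ (if 1 < R then [R] else [])

def dlistG (gs : List (Int × Int)) (R : Int) : List Int := gs.map Prod.fst ++ (if 1 < R then [R] else [])

def dlen (q : Int) : Int := PySem.List.len (PySem.Int.toChars q)

def wG (gs : List (Int × Int)) : Int := (gs.map (fun g => dlen g.1 + if 1 < g.2 then dlen g.2 else 0)).sum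

def isDig (c : Char) : Bool :=
  c == '0' || c == '1' || c == '2' || c == '3' || c == '4' ||
  c == '5' || c == '6' || c == '7' || c == '8' || c == '9'

def WA (p : List Int) (v : Int) : Int := dlen v + (if powerA v p ≠ 1 then dlen (powerA v p) else 0)

-- ---- bInner facts ----

theorem bInner_shift (d m : Int) : ∀ e : Int, bInner m d e = ((bInner m d 0).1, (bInner m d 0).2 + e) := by
  suffices key : ∀ (N : Nat) (m : Int), m.toNat ≤ N → ∀ e : Int,
      bInner m d e = ((bInner m d 0).1, (bInner m d 0).2 + e) by
    exact key m.toNat m le_rfl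
  intro N
  induction N with
  | zero =>
    intro m hm e
    by_cases h : PySem.Int.mod m d = 0 ∧ 2 ≤ d ∧ 0 < m
    · omega
    · rw [bInner, dif_neg h, bInner, dif_neg h]; simp
  | succ N ih =>
    intro m hm e
    by_cases h : PySem.Int.mod m d = 0 ∧ 2 ≤ d ∧ 0 < m
    · have hdec : (PySem.Int.floordiv m d).toNat < m.toNat := by
        obtain ⟨h1, h2, h3⟩ := h
        rw [PySem.Int.floordiv_eq_ediv_of_pos (by omega : (0:Int) < d)]
        have hlt : m / d < m := Int.ediv_lt_of_lt_mul (by omega) (by nlinarith)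
        have hnn : 0 ≤ m / d := Int.ediv_nonneg (by omega) (by omega)
        omega
      rw [show bInner m d e = bInner (PySem.Int.floordiv m d) d (e + 1) from by rw [bInner, dif_pos h],
          show bInner m d 0 = bInner (PySem.Int.floordiv m d) d (0 + 1) from by rw [bInner, dif_pos h]]
      rw [ih _ (by omega) (e + 1), ih _ (by omega) (0 + 1)]
      simp; omega
    · rw [bInner, dif_neg h, bInner, dif_neg h]; simp

theorem bInner_snd_ge (d m e : Int) : e ≤ (bInner m d e).2 := by
  induction m, e using bInner.induct d with
  | case1 m e h ih => rw [bInner, dif_pos h]; omega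
  | case2 m e h => rw [bInner, dif_neg h]

theorem bInner_spec (d m e : Int) (hd : 2 ≤ d) (hm : 0 < m) :
    0 < (bInner m d e).1 ∧ (bInner m d e).1 ∣ m ∧ ¬ d ∣ (bInner m d e).1 := by
  induction m, e using bInner.induct d with
  | case1 m e h ih =>
    obtain ⟨h1, h2, h3⟩ := h
    rw [bInner, dif_pos ⟨h1, h2, h3⟩]
    have hdvd : d ∣ m := (PySem.Int.mod_eq_zero_iff_dvd m d).mp h1
    have hfd : PySem.Int.floordiv m d = m / d := PySem.Int.floordiv_eq_ediv_of_pos (by omega)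
    have hpos : 0 < PySem.Int.floordiv m d := by
      obtain ⟨c, rfl⟩ := hdvd
      rw [hfd, Int.mul_ediv_cancel_left _ (by omega : d ≠ 0)]
      nlinarith
    obtain ⟨hp, hdv, hnd⟩ := ih hpos
    refine ⟨hp, ?_, hnd⟩
    calc (bInner (PySem.Int.floordiv m d) d (e + 1)).1 ∣ PySem.Int.floordiv m d := hdv
      _ ∣ m := by rw [hfd]; exact Int.ediv_dvd_of_dvd hdvd
  | case2 m e h =>
    rw [bInner, dif_neg h]
    push_neg at h
    refine ⟨hm, dvd_refl m, fun hdm => ?_⟩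
    have := (PySem.Int.mod_eq_zero_iff_dvd m d).mpr hdm
    exact absurd hm (by simpa [this, hd] using h)

theorem innerA_eq (d : Int) : ∀ (n : Int) (acc : List Int),
    innerA d n acc = (acc ++ List.replicate (bInner n d 0).2.toNat d, (bInner n d 0).1) := by
  intro n acc
  induction n, acc using innerA.induct d with
  | case1 n acc h ih =>
    rw [innerA, dif_pos h, ih]
    rw [show bInner n d 0 = bInner (PySem.Int.floordiv n d) d (0 + 1) from by rw [bInner, dif_pos h]]
    rw [bInner_shift d (PySem.Int.floordiv n d) (0 + 1)]
    have hge : 0 ≤ (bInner (PySem.Int.floordiv n d) d 0).2 := bInner_snd_ge d _ 0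
    have : ((bInner (PySem.Int.floordiv n d) d 0).2 + (0 + 1)).toNat =
        (bInner (PySem.Int.floordiv n d) d 0).2.toNat + 1 := by omega
    rw [this, List.replicate_succ]
    simp
  | case2 n acc h =>
    rw [innerA, dif_neg h, bInner, dif_neg h]
    simp

-- ---- both outer loops against the trace ----

theorem outerA_eq (k : Nat) (n : Int) : ∀ acc : List Int,
    outerA k n acc = (acc ++ flatG (grs k n).1, (grs k n).2) := by
  induction k, n using grs.induct with
  | case1 k m hle hmod p ih =>
    intro acc
    have hp : p = bInner m ((k : Int) + 2) 0 := rfl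
    rw [hp] at ih
    rw [outerA, dif_pos hle, grs, dif_pos hle, if_pos hmod]
    simp only [innerA_eq]
    rw [ih]
    simp [flatG]
  | case2 k m hle hmod ih =>
    intro acc
    rw [outerA, dif_pos hle, grs, dif_pos hle, if_neg hmod]
    have hb : bInner m ((k : Int) + 2) 0 = (m, 0) := by
      rw [bInner, dif_neg (by simp [hmod])]
    simp only [innerA_eq, hb, ih]
    simp
  | case3 k m hle =>
    intro acc
    rw [outerA, dif_neg hle, grs, dif_neg hle]
    simp [flatG]

theorem bOuter_eq (k : Nat) (m : Int) : ∀ s : Int,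
    bOuter k m s = (s + wG (grs k m).1, (grs k m).2) := by
  induction k, m using grs.induct with
  | case1 k m hle hmod p ih =>
    intro s
    have hp : p = bInner m ((k : Int) + 2) 0 := rfl
    rw [hp] at ih
    rw [bOuter, dif_pos hle, if_pos hmod, grs, dif_pos hle, if_pos hmod]
    simp only []
    rw [ih]
    simp only [wG, List.map_cons, List.sum_cons, dlen, Prod.mk.injEq]
    exact ⟨by ring, trivial⟩
  | case2 k m hle hmod ih =>
    intro s
    rw [bOuter, dif_pos hle, if_neg hmod, grs, dif_pos hle, if_neg hmod, ih]
  | case3 k m hle =>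
    intro s
    rw [bOuter, dif_neg hle, grs, dif_neg hle]
    simp [wG]

-- ---- trace invariants ----

theorem grs_R_dvd (k : Nat) (m : Int) (hm : 0 < m) : (grs k m).2 ∣ m ∧ 0 < (grs k m).2 := by
  induction k, m using grs.induct with
  | case1 k m hle hmod p ih =>
    rw [grs, dif_pos hle, if_pos hmod]
    have hpe : p = bInner m ((k : Int) + 2) 0 := rfl
    rw [hpe] at ih
    obtain ⟨hp, hdv, _⟩ := bInner_spec ((k : Int) + 2) m 0 (by omega) hm
    obtain ⟨h1, h2⟩ := ih hp
    exact ⟨h1.trans hdv, h2⟩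
  | case2 k m hle hmod ih =>
    rw [grs, dif_pos hle, if_neg hmod]
    exact ih hm
  | case3 k m hle =>
    rw [grs, dif_neg hle]
    exact ⟨dvd_refl m, hm⟩

theorem grs_inv (k : Nat) (m : Int) (hm : 0 < m) :
    (∀ g ∈ (grs k m).1, 2 ≤ g.1 ∧ 1 ≤ g.2 ∧ (k : Int) + 2 ≤ g.1 ∧ ¬ g.1 ∣ (grs k m).2) ∧
    ((grs k m).1.map Prod.fst).Pairwise (· < ·) := by
  induction k, m using grs.induct with
  | case1 k m hle hmod p ih =>
    rw [grs, dif_pos hle, if_pos hmod]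
    have hpe : p = bInner m ((k : Int) + 2) 0 := rfl
    rw [hpe] at ih
    obtain ⟨hp, hdv, hnd⟩ := bInner_spec ((k : Int) + 2) m 0 (by omega) hm
    obtain ⟨ihg, ihp⟩ := ih hp
    have hRdvd := (grs_R_dvd (k + 1) (bInner m ((k : Int) + 2) 0).1 hp).1
    have he : 1 ≤ (bInner m ((k : Int) + 2) 0).2 := by
      have hstep : bInner m ((k : Int) + 2) 0 = bInner (PySem.Int.floordiv m ((k : Int) + 2)) ((k : Int) + 2) (0 + 1) := by
        rw [bInner, dif_pos ⟨hmod, by omega, hm⟩]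
      rw [hstep]
      have := bInner_snd_ge ((k : Int) + 2) (PySem.Int.floordiv m ((k : Int) + 2)) (0 + 1)
      omega
    constructor
    · intro g hg
      rcases List.mem_cons.mp hg with rfl | hg'
      · refine ⟨by omega, he, le_rfl, fun hdR => hnd (hdR.trans hRdvd)⟩
      · obtain ⟨a1, a2, a3, a4⟩ := ihg g hg'
        exact ⟨a1, a2, by push_cast at a3 ⊢; omega, a4⟩
    · rw [List.map_cons]
      refine List.pairwise_cons.mpr ⟨?_, ihp⟩
      intro b hb
      obtain ⟨g, hg, rfl⟩ := List.mem_map.mp hb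
      obtain ⟨_, _, a3, _⟩ := ihg g hg
      push_cast at a3; omega
  | case2 k m hle hmod ih =>
    rw [grs, dif_pos hle, if_neg hmod]
    obtain ⟨ihg, ihp⟩ := ih hm
    refine ⟨fun g hg => ?_, ihp⟩
    obtain ⟨a1, a2, a3, a4⟩ := ihg g hg
    exact ⟨a1, a2, by push_cast at a3 ⊢; omega, a4⟩
  | case3 k m hle =>
    rw [grs, dif_neg hle]
    simp

theorem grs_props (k : Nat) (m : Int) :
    (∀ g ∈ (grs k m).1, 2 ≤ g.1 ∧ 1 ≤ g.2 ∧ ¬ g.1 ∣ (grs k m).2) ∧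
    ((grs k m).1.map Prod.fst).Pairwise (· < ·) := by
  by_cases hm : 0 < m
  · obtain ⟨hg, hp⟩ := grs_inv k m hm
    exact ⟨fun g h => ⟨(hg g h).1, (hg g h).2.1, (hg g h).2.2.2⟩, hp⟩
  · have : grs k m = ([], m) := by
      rw [grs, dif_neg (by nlinarith [Int.natCast_nonneg k] : ¬ ((k : Int) + 2) * ((k : Int) + 2) ≤ m)]
    rw [this]
    simp

-- ---- structure of the factor list: dedup, index order, counts ----

theorem mem_plist (gs : List (Int × Int)) (R : Int) (Hg : ∀ g ∈ gs, 1 ≤ g.2) (x : Int) :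
    x ∈ plistG gs R ↔ x ∈ dlistG gs R := by
  simp only [plistG, dlistG, List.mem_append]
  refine or_congr ?_ Iff.rfl
  simp only [flatG, List.mem_flatMap, List.mem_replicate, List.mem_map]
  constructor
  · rintro ⟨g, hg, hne, rfl⟩
    exact ⟨g, hg, rfl⟩
  · rintro ⟨g, hg, rfl⟩
    exact ⟨g, hg, by have := Hg g hg; omega, rfl⟩

theorem nodup_dlist (gs : List (Int × Int)) (R : Int)
    (Hg : ∀ g ∈ gs, ¬ g.1 ∣ R) (Hp : (gs.map Prod.fst).Pairwise (· < ·)) :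
    (dlistG gs R).Nodup := by
  have hfst : (gs.map Prod.fst).Nodup := Hp.imp ne_of_lt
  have hR : R ∉ gs.map Prod.fst := by
    intro hmem
    obtain ⟨g, hg, hgr⟩ := List.mem_map.mp hmem
    exact Hg g hg (hgr ▸ dvd_refl _)
  unfold dlistG
  split_ifs with h
  · rw [List.nodup_append]
    refine ⟨hfst, List.nodup_singleton _, ?_⟩
    intro a ha b hb
    simp only [List.mem_singleton] at hb
    subst hb
    exact fun h => hR (h ▸ ha)
  · simpa using hfst

theorem plist_cons (g : Int × Int) (gs : List (Int × Int)) (R : Int) :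
    plistG (g :: gs) R = List.replicate g.2.toNat g.1 ++ plistG gs R := by
  simp [plistG, flatG]

theorem count_plist (gs : List (Int × Int)) (R : Int)
    (Hg : ∀ g ∈ gs, 2 ≤ g.1 ∧ 1 ≤ g.2 ∧ ¬ g.1 ∣ R) (Hp : (gs.map Prod.fst).Pairwise (· < ·)) :
    (∀ g ∈ gs, (List.count g.1 (plistG gs R) : Int) = g.2) ∧
    (1 < R → List.count R (plistG gs R) = 1) := by
  induction gs with
  | nil =>
    refine ⟨by simp, fun hR => ?_⟩
    simp [plistG, flatG, if_pos hR]
  | cons g gs ih =>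
    have Hg' : ∀ g' ∈ gs, 2 ≤ g'.1 ∧ 1 ≤ g'.2 ∧ ¬ g'.1 ∣ R := fun g' h => Hg g' (List.mem_cons_of_mem _ h)
    have Hp' : (gs.map Prod.fst).Pairwise (· < ·) := (List.pairwise_cons.mp (by simpa using Hp)).2
    have hlt : ∀ g' ∈ gs, g.1 < g'.1 := by
      intro g' h
      exact (List.pairwise_cons.mp (by simpa using Hp)).1 g'.1 (List.mem_map.mpr ⟨g', h, rfl⟩)
    obtain ⟨hq2, he, hndvd⟩ := Hg g (List.mem_cons_self)
    obtain ⟨ih1, ih2⟩ := ih Hg' Hp'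
    have hnotmem : g.1 ∉ plistG gs R := by
      rw [mem_plist gs R (fun g' h => (Hg' g' h).2.1)]
      intro hmem
      rcases List.mem_append.mp hmem with h1 | h2
      · obtain ⟨g', h', hg'⟩ := List.mem_map.mp h1
        have := hlt g' h'
        omega
      · have hR : 1 < R := by by_contra hc; simp [if_neg hc] at h2
        rw [if_pos hR] at h2
        simp at h2
        exact hndvd (h2 ▸ dvd_refl _)
    constructor
    · intro g' hg'
      rcases List.mem_cons.mp hg' with rfl | hmem
      · rw [plist_cons, List.count_append, List.count_replicate,
            List.count_eq_zero_of_not_mem hnotmem]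
        simp
        omega
      · rw [plist_cons, List.count_append, List.count_replicate]
        have hne : (g.1 == g'.1) = false := by
          have := hlt g' hmem; simp; omega
        rw [hne]
        simpa using ih1 g' hmem
    · intro hR
      rw [plist_cons, List.count_append, List.count_replicate]
      have hne : (g.1 == R) = false := by
        simp
        intro heq
        exact hndvd (heq ▸ dvd_refl _)
      rw [hne]
      simpa using ih2 hR

theorem index_replicate_append (q b : Int) (hne : b ≠ q) (t : List Int) : ∀ e : Nat,
    PySem.List.index? (List.replicate e q ++ t) b = (PySem.List.index? t b).map (· + e) := by
  intro e
  induction e with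
  | zero =>
    simp only [List.replicate_zero, List.nil_append]
    cases h : PySem.List.index? t b <;> simp
  | succ e ih =>
    rw [List.replicate_succ, List.cons_append,
        PySem.List.index?_cons_of_ne _ (fun h => hne h.symm), ih]
    cases h : PySem.List.index? t b <;> simp <;> omega

theorem dlist_cons (g : Int × Int) (gs : List (Int × Int)) (R : Int) :
    dlistG (g :: gs) R = g.1 :: dlistG gs R := by
  simp [dlistG]

theorem mem_dlist_ne_head (gs : List (Int × Int)) (R : Int) (q : Int)
    (Hdvd : ¬ q ∣ R) (hlt : ∀ g' ∈ gs, q < g'.1) :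
    ∀ b ∈ dlistG gs R, b ≠ q := by
  intro b hb
  rcases List.mem_append.mp hb with h1 | h2
  · obtain ⟨g', h', rfl⟩ := List.mem_map.mp h1
    have := hlt g' h'
    omega
  · have hR : 1 < R := by by_contra hc; simp [dlistG, if_neg hc] at h2
    rw [if_pos hR] at h2
    simp only [List.mem_singleton] at h2
    subst h2
    exact fun h => Hdvd (h ▸ dvd_refl _)

theorem index_pairwise (gs : List (Int × Int)) (R : Int)
    (Hg : ∀ g ∈ gs, 2 ≤ g.1 ∧ 1 ≤ g.2 ∧ ¬ g.1 ∣ R) (Hp : (gs.map Prod.fst).Pairwise (· < ·)) :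
    (dlistG gs R).Pairwise
      (fun a b => (PySem.List.index? (plistG gs R) a).getD 0 < (PySem.List.index? (plistG gs R) b).getD 0) := by
  induction gs with
  | nil =>
    unfold dlistG
    split_ifs <;> simp
  | cons g gs ih =>
    have Hg' : ∀ g' ∈ gs, 2 ≤ g'.1 ∧ 1 ≤ g'.2 ∧ ¬ g'.1 ∣ R := fun g' h => Hg g' (List.mem_cons_of_mem _ h)
    have Hp' : (gs.map Prod.fst).Pairwise (· < ·) := (List.pairwise_cons.mp (by simpa using Hp)).2
    have hlt : ∀ g' ∈ gs, g.1 < g'.1 := by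
      intro g' h
      exact (List.pairwise_cons.mp (by simpa using Hp)).1 g'.1 (List.mem_map.mpr ⟨g', h, rfl⟩)
    obtain ⟨hq2, he, hndvd⟩ := Hg g (List.mem_cons_self)
    have hne := mem_dlist_ne_head gs R g.1 hndvd hlt
    have hpc := plist_cons g gs R
    have hrep : ∃ eN : Nat, g.2.toNat = eN + 1 := ⟨g.2.toNat - 1, by omega⟩
    obtain ⟨eN, heN⟩ := hrep
    have hhead : PySem.List.index? (plistG (g :: gs) R) g.1 = some 0 := by
      rw [hpc, heN, List.replicate_succ, List.cons_append, PySem.List.index?_cons_self]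
    have hshift : ∀ b ∈ dlistG gs R,
        PySem.List.index? (plistG (g :: gs) R) b =
          (PySem.List.index? (plistG gs R) b).map (· + g.2.toNat) := by
      intro b hb
      rw [hpc, index_replicate_append g.1 b (hne b hb)]
    have hsome : ∀ b ∈ dlistG gs R, ∃ j, PySem.List.index? (plistG gs R) b = some j := by
      intro b hb
      have hmem : b ∈ plistG gs R := (mem_plist gs R (fun g' h => (Hg' g' h).2.1) b).mpr hb
      rw [← PySem.List.index?_isSome_iff] at hmem
      exact Option.isSome_iff_exists.mp hmem
    rw [dlist_cons]
    refine List.pairwise_cons.mpr ⟨?_, ?_⟩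
    · intro b hb
      obtain ⟨j, hj⟩ := hsome b hb
      rw [hhead, hshift b hb, hj]
      simp
      omega
    · refine (ih Hg' Hp').imp_of_mem ?_
      intro a b ha hb hab
      obtain ⟨ja, hja⟩ := hsome a ha
      obtain ⟨jb, hjb⟩ := hsome b hb
      rw [hshift a ha, hshift b hb, hja, hjb]
      rw [hja, hjb] at hab
      simp at hab ⊢
      omega

theorem hashe_plist (gs : List (Int × Int)) (R : Int)
    (Hg : ∀ g ∈ gs, 2 ≤ g.1 ∧ 1 ≤ g.2 ∧ ¬ g.1 ∣ R) (Hp : (gs.map Prod.fst).Pairwise (· < ·)) :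
    hasheA (plistG gs R) = dlistG gs R := by
  unfold hasheA
  apply PySem.List.sorted_eq_of_perm_of_pairwise_lt
  · rw [List.perm_ext_iff_of_nodup
      (nodup_dlist gs R (fun g h => (Hg g h).2.2) Hp) (PySem.Set.nodup_ofList _)]
    intro a
    rw [PySem.Set.mem_ofList, mem_plist gs R (fun g h => (Hg g h).2.1)]
  · exact index_pairwise gs R Hg Hp

-- ---- digit counting ----

theorem digitChar_isDig (n : Nat) (h : n < 10) : isDig n.digitChar := by
  interval_cases n <;> decide

theorem toDigitsCore_digits : ∀ (f n : Nat) (l : List Char), (∀ c ∈ l, isDig c) →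
    ∀ c ∈ Nat.toDigitsCore 10 f n l, isDig c := by
  intro f
  induction f with
  | zero => intro n l hl c hc; exact hl c hc
  | succ f ih =>
    intro n l hl c hc
    rw [Nat.toDigitsCore] at hc
    have hd : isDig (n % 10).digitChar := digitChar_isDig _ (Nat.mod_lt _ (by omega))
    by_cases h : n / 10 = 0
    · rw [if_pos h] at hc
      rcases List.mem_cons.mp hc with rfl | hc'
      · exact hd
      · exact hl c hc'
    · rw [if_neg h] at hc
      refine ih (n / 10) _ ?_ c hc
      intro c' hc'
      rcases List.mem_cons.mp hc' with rfl | hc''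
      · exact hd
      · exact hl c' hc''

theorem toChars_digits (q : Int) (hq : 0 ≤ q) : ∀ c ∈ PySem.Int.toChars q, isDig c := by
  unfold PySem.Int.toChars
  rw [if_neg (by omega)]
  exact toDigitsCore_digits _ _ [] (by simp)

theorem dc_toChars (q : Int) (hq : 0 ≤ q) :
    (List.countP isDig (PySem.Int.toChars q) : Int) = dlen q := by
  unfold dlen
  rw [PySem.List.len_eq, List.countP_eq_length.mpr (toChars_digits q hq)]

theorem toDigitsCore_length_ge : ∀ (f n : Nat) (l : List Char), 0 < f →
    l.length + 1 ≤ (Nat.toDigitsCore 10 f n l).length := by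
  intro f
  induction f with
  | zero => intro n l h; omega
  | succ f ih =>
    intro n l _
    rw [Nat.toDigitsCore]
    by_cases h : n / 10 = 0
    · rw [if_pos h]; simp
    · rw [if_neg h]
      cases f with
      | zero => rw [Nat.toDigitsCore]; simp
      | succ f' =>
        have := ih (n / 10) ((n % 10).digitChar :: l) (by omega)
        simp at this ⊢
        omega

theorem toChars_len2 (j : Int) (hj : 10 ≤ j) : 2 ≤ (PySem.Int.toChars j).length := by
  unfold PySem.Int.toChars
  rw [if_neg (by omega)]
  unfold Nat.toDigits
  have hj10 : 10 ≤ j.toNat := by omega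
  rcases Nat.exists_eq_add_of_le hj10 with ⟨t, ht⟩
  rw [Nat.toDigitsCore]
  have hne : j.toNat / 10 ≠ 0 := by omega
  rw [if_neg hne]
  have := toDigitsCore_length_ge (j.toNat - 1 + 1) (j.toNat / 10) [(j.toNat % 10).digitChar]
    (by omega)
  have harg : j.toNat - 1 + 1 = j.toNat := by omega
  rw [harg] at this
  simpa using this

theorem toChars_single (j : Int) (h0 : 0 ≤ j) (h9 : j < 10) :
    PySem.Int.toChars j = [Nat.digitChar j.toNat] := by
  unfold PySem.Int.toChars
  rw [if_neg (by omega)]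
  unfold Nat.toDigits
  rw [Nat.toDigitsCore, if_pos (by omega : j.toNat / 10 = 0)]
  rw [Nat.mod_eq_of_lt (by omega)]

theorem inner_count (c : Char) (s : Int) :
    (PySem.List.pyRange 0 100).foldl (fun s j => if [c] = PySem.Int.toChars j then s + 1 else s) s =
    s + (if isDig c then 1 else 0) := by
  rw [PySem.List.foldl_ite_add_one (fun j => [c] = PySem.Int.toChars j) (PySem.List.pyRange 0 100) s]
  congr 1
  by_cases hd : isDig c
  · rw [if_pos hd]
    simp only [isDig, Bool.or_eq_true, beq_iff_eq] at hd
    rcases hd with ((((((((h | h) | h) | h) | h) | h) | h) | h) | h) | h <;> subst h <;> decide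
  · rw [if_neg hd]
    norm_cast
    rw [List.countP_eq_zero]
    intro j hj
    have hjr : 0 ≤ j ∧ j < 100 := by
      have := PySem.List.mem_pyRange_one.mp hj
      omega
    simp only [decide_eq_true_eq]
    intro heq
    by_cases hj10 : j < 10
    · rw [toChars_single j hjr.1 hj10] at heq
      have hc : c = Nat.digitChar j.toNat := by simpa using heq
      have := digitChar_isDig j.toNat (by omega)
      rw [← hc] at this
      exact absurd this (by simp [hd])
    · have h2 := toChars_len2 j (by omega)
      have := congrArg List.length heq
      simp at this
      omega

theorem scan_eq_countP (chars : List Char) :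
    (PySem.List.pyRange 0 (PySem.List.len chars)).foldl (fun s i =>
      (PySem.List.pyRange 0 100).foldl (fun s j =>
        if [PySem.List.pyGetD chars i ' '] = PySem.Int.toChars j then s + 1 else s) s) (0 : Int) =
    (List.countP isDig chars : Int) := by
  simp only [PySem.List.len_eq]
  rw [PySem.List.foldl_pyRange_zero_pyGetD' chars ' '
    (fun s c => (PySem.List.pyRange 0 100).foldl (fun s j => if [c] = PySem.Int.toChars j then s + 1 else s) s) 0]
  have hfun : (fun (s : Int) (c : Char) =>
      (PySem.List.pyRange 0 100).foldl (fun s j => if [c] = PySem.Int.toChars j then s + 1 else s) s) =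
      fun s c => s + (if isDig c then 1 else 0) :=
    funext fun s => funext fun c => inner_count c s
  rw [hfun, PySem.List.foldl_add chars (fun c => if isDig c then (1:Int) else 0) 0,
      PySem.List.sum_map_ite_one_zero isDig chars]
  simp

-- ---- the string built by final ----

theorem dc_final_fold (a p : List Int) (ha : ∀ v ∈ a, 0 ≤ v) :
    ∀ (is : List Int) (x : List Char),
    (List.countP isDig (is.foldl (fun x i =>
      let x := if powerA (PySem.List.pyGetD a i 0) p ≠ 1 then
          x ++ (PySem.Int.toChars (PySem.List.pyGetD a i 0) ++ ['^'] ++ ['{'] ++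
                PySem.Int.toChars (powerA (PySem.List.pyGetD a i 0) p)) ++ ['}']
        else x ++ PySem.Int.toChars (PySem.List.pyGetD a i 0)
      if i ≠ PySem.List.len a - 1 then x ++ ['x'] else x) x) : Int) =
    (List.countP isDig x : Int) + (is.map (fun i => WA p (PySem.List.pyGetD a i 0))).sum := by
  have hv : ∀ i : Int, (0:Int) ≤ PySem.List.pyGetD a i 0 := by
    intro i
    by_cases h : PySem.Raise.InRange a.length i
    · exact ha _ (PySem.List.pyGetD_mem a 0 h)
    · rw [PySem.List.pyGetD_of_none _ _ _ ((PySem.List.pyGet?_eq_none_iff _ _).mpr h)]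
  have hpw : ∀ v : Int, (0:Int) ≤ powerA v p := by
    intro v; unfold powerA; positivity
  intro is
  induction is with
  | nil => intro x; simp
  | cons i is ih =>
    intro x
    rw [List.foldl_cons, ih, List.map_cons, List.sum_cons]
    have hstep : ∀ y : List Char,
        (List.countP isDig ((fun x i =>
          let x := if powerA (PySem.List.pyGetD a i 0) p ≠ 1 then
              x ++ (PySem.Int.toChars (PySem.List.pyGetD a i 0) ++ ['^'] ++ ['{'] ++
                    PySem.Int.toChars (powerA (PySem.List.pyGetD a i 0) p)) ++ ['}']
            else x ++ PySem.Int.toChars (PySem.List.pyGetD a i 0)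
          if i ≠ PySem.List.len a - 1 then x ++ ['x'] else x) y i) : Int) =
        (List.countP isDig y : Int) + WA p (PySem.List.pyGetD a i 0) := by
      intro y
      dsimp only
      unfold WA
      split_ifs with h1 h2 <;>
        simp only [List.countP_append] <;>
        push_cast <;>
        rw [dc_toChars _ (hv i)] <;>
        (try rw [dc_toChars _ (hpw _)]) <;>
        simp [List.countP_cons, List.countP_nil, isDig] <;>
        try ring
    rw [hstep]
    ring

theorem sum_WA (gs : List (Int × Int)) (R : Int)
    (Hg : ∀ g ∈ gs, 2 ≤ g.1 ∧ 1 ≤ g.2 ∧ ¬ g.1 ∣ R) (Hp : (gs.map Prod.fst).Pairwise (· < ·)) :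
    ((dlistG gs R).map (WA (plistG gs R))).sum = wG gs + (if 1 < R then dlen R else 0) := by
  obtain ⟨hcount, hcountR⟩ := count_plist gs R Hg Hp
  unfold dlistG
  rw [List.map_append, List.sum_append]
  have h1 : ((gs.map Prod.fst).map (WA (plistG gs R))).sum = wG gs := by
    rw [List.map_map]
    unfold wG
    congr 1
    apply List.map_congr_left
    intro g hg
    show WA (plistG gs R) g.1 = _
    unfold WA
    have hcnt : powerA g.1 (plistG gs R) = g.2 := by
      unfold powerA
      rw [PySem.List.count_eq]
      exact hcount g hg
    rw [hcnt]
    have he : 1 ≤ g.2 := (Hg g hg).2.1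
    by_cases h : g.2 = 1
    · rw [if_neg (by omega), if_neg (by simp [h])]
    · rw [if_pos (by omega), if_pos (by omega)]
  rw [h1]
  congr 1
  by_cases h : 1 < R
  · rw [if_pos h, if_pos h]
    have hcnt : powerA R (plistG gs R) = 1 := by
      unfold powerA
      rw [PySem.List.count_eq, hcountR h]
      norm_num
    simp [WA, hcnt]
  · rw [if_neg h, if_neg h]
    simp

theorem frugal_eq (n : Int) : frugal n = frugal_alt n := by
  obtain ⟨Hg, Hp⟩ := grs_props 0 n
  have hPF : primeFactorsA n = plistG (grs 0 n).1 (grs 0 n).2 := by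
    unfold primeFactorsA
    rw [outerA_eq 0 n []]
    dsimp only
    unfold plistG
    split_ifs with h <;> simp
  have ha0 : ∀ v ∈ dlistG (grs 0 n).1 (grs 0 n).2, (0:Int) ≤ v := by
    intro v hv
    rcases List.mem_append.mp hv with h1 | h2
    · obtain ⟨g, hg, rfl⟩ := List.mem_map.mp h1
      have := (Hg g hg).1; omega
    · by_cases h : 1 < (grs 0 n).2
      · rw [if_pos h] at h2
        simp only [List.mem_singleton] at h2
        omega
      · rw [if_neg h] at h2
        simp at h2
  have hfin : (List.countP isDig (finalA n) : Int) =
      wG (grs 0 n).1 + (if 1 < (grs 0 n).2 then dlen (grs 0 n).2 else 0) := by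
    unfold finalA
    rw [hPF]
    dsimp only
    rw [hashe_plist _ _ Hg Hp]
    rw [dc_final_fold (dlistG (grs 0 n).1 (grs 0 n).2) (plistG (grs 0 n).1 (grs 0 n).2) ha0 _ []]
    simp only [PySem.List.len_eq, List.countP_nil, Nat.cast_zero, zero_add]
    rw [show (fun i => WA (plistG (grs 0 n).1 (grs 0 n).2)
          (PySem.List.pyGetD (dlistG (grs 0 n).1 (grs 0 n).2) i 0)) =
        (WA (plistG (grs 0 n).1 (grs 0 n).2)) ∘
          (fun i => PySem.List.pyGetD (dlistG (grs 0 n).1 (grs 0 n).2) i 0) from rfl]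
    rw [← List.map_map, PySem.List.map_pyGetD_pyRange_zero']
    exact sum_WA _ _ Hg Hp
  unfold frugal frugal_alt
  rw [bOuter_eq 0 n 0]
  dsimp only
  rw [scan_eq_countP (finalA n), hfin]
  by_cases hR1 : 1 < (grs 0 n).2
  · rw [if_pos hR1, if_pos hR1]
    by_cases hcmp : wG (grs 0 n).1 + dlen (grs 0 n).2 ≥ PySem.List.len (PySem.Int.toChars n)
    · rw [if_pos hcmp]
      symm
      rw [decide_eq_false_iff_not]
      unfold dlen at hcmp
      omega
    · rw [if_neg hcmp]
      symm
      rw [decide_eq_true_iff]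
      unfold dlen at hcmp
      omega
  · rw [if_neg hR1, if_neg hR1]
    by_cases hcmp : wG (grs 0 n).1 + 0 ≥ PySem.List.len (PySem.Int.toChars n)
    · rw [if_pos hcmp]
      symm
      rw [decide_eq_false_iff_not]
      omega
    · rw [if_neg hcmp]
      symm
      rw [decide_eq_true_iff]
      omega


-- ===== VERDICT (by name: the statement is the Claim_ definition above) =====
theorem frugal_spec : Claim_equal_frugal := by
  intro n _
  unfold Spec_frugal
  exact frugal_eq n
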